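-- pv_equiv track=rewrite | github.com/PradeepTammali/Hacker-Rank | World CodeSprint 13/WatsonLoveforArrays.py | howManyGoodSubarrays
-- ===== SOURCE A (Python) =====
-- from functools import reduce
-- from operator import mul
--
-- def howManyGoodSubarrays(A, m, k):
--     # Return the number of good subarrays of A.
--     # Finding all the subarrays
--     count = 0
--     n = len(A)
--     for i in range(0, n):
--         # if k != 0 and A[i] == 0:
--         #     continue
--         # elif k == 0 and A[i] == 0:
--         #     if i <= int(n/2):
--         #         index = i+1
--         #     else:
--         #         index = (n - (i+1))+1
--         #     count += index*(n - (index-1))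
--         # else:
--         for j in range(i, n):
--             if k != 0 and (0 in A[i:j+1]):
--                 continue
--             elif k == 0 and (0 in A[i:j+1]):
--                 count += 1
--             elif reduce(mul, A[i:j+1]) % m == k:
--                 count += 1
--     return count
-- ===== SOURCE B (Python) =====
-- def howManyGoodSubarrays(A, m, k):
--     # One pass per start index: maintain running product mod m and a zero flag.
--     count = 0
--     n = len(A)
--     for i in range(n):
--         p = 1
--         has_zero = False
--         for j in range(i, n):
--             if A[j] == 0:
--                 has_zero = True
--             if has_zero:
--                 if k == 0:
--                     count += 1
--             else:
--                 p = (p * A[j]) % m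
--                 if p == k:
--                     count += 1
--     return count
-- ===== Notes on version B (the rewrite author's own statement) =====
-- stated objective: faster
-- what changed: Instead of re-slicing A[i:j+1], scanning it for zeros and re-reducing its full product for every (i,j) pair, B keeps, for each start index i, a running product modulo m and a zero flag that are updated in O(1) as the end index grows.
import Mathlib
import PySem

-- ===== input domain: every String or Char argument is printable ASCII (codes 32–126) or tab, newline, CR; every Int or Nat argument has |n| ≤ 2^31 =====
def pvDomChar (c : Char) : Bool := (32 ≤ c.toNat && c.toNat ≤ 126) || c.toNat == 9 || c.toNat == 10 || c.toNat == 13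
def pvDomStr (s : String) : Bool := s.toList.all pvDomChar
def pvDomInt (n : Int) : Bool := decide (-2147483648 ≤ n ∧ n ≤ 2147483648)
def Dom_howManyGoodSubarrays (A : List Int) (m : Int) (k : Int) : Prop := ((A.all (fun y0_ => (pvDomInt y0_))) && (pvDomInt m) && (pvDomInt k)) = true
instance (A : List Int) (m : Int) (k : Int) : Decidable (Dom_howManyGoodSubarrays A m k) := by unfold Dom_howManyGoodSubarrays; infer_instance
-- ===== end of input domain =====

-- B replaces A's O(n^3) slice-scan-and-reduce inner loop by maintaining, for each start
-- index, a running product mod m and a zero flag as the end index grows (asymptotically faster).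


-- ===== PORT A =====
-- reduce(mul, l) on a nonempty list (A only applies it to nonempty slices; [] case is a dummy)
def pvReduceMul (l : List Int) : Int :=
  match l with
  | [] => 0
  | x :: xs => xs.foldl (· * ·) x

-- the body of A's inner loop (named for use in the proofs; the code is A's, line for line)
def pvBodyA (A : List Int) (m k : Int) (count : Int) (i j : Int) : Int :=
  if k ≠ 0 ∧ (0 : Int) ∈ PySem.List.slice A (some i) (some (j + 1)) then count
  else if k = 0 ∧ (0 : Int) ∈ PySem.List.slice A (some i) (some (j + 1)) then count + 1
  else if PySem.Int.mod (pvReduceMul (PySem.List.slice A (some i) (some (j + 1)))) m = k then count + 1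
  else count

def howManyGoodSubarrays (A : List Int) (m : Int) (k : Int) : Int :=
  let n : Int := A.length
  (PySem.List.pyRange 0 n 1).foldl (fun count i =>
    (PySem.List.pyRange i n 1).foldl (fun count j => pvBodyA A m k count i j) count) 0

-- ===== PORT B =====
-- the body of B's inner loop: state (count, p, has_zero), one element a = A[j]
def pvStepB (m k : Int) (st : Int × Int × Bool) (a : Int) : Int × Int × Bool :=
  let hz := st.2.2 || (a == 0)
  if hz then
    (if k = 0 then st.1 + 1 else st.1, st.2.1, hz)
  else
    let p := PySem.Int.mod (st.2.1 * a) m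
    (if p = k then st.1 + 1 else st.1, p, hz)

def howManyGoodSubarrays_alt (A : List Int) (m : Int) (k : Int) : Int :=
  let n : Int := A.length
  (PySem.List.pyRange 0 n 1).foldl (fun count i =>
    ((PySem.List.pyRange i n 1).foldl
        (fun st j => pvStepB m k st (PySem.List.pyGetD A j 0)) (count, 1, false)).1) 0

-- ===== PRECONDITION & SPEC =====
-- Pre_ excludes exactly the inputs where Python A raises ZeroDivisionError (m = 0 while some
-- subarray is zero-free, i.e. some element is nonzero); Python B raises there as well.
def Pre_howManyGoodSubarrays (A : List Int) (m : Int) (k : Int) : Prop :=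
  m ≠ 0 ∨ ∀ x ∈ A, x = 0

instance (A : List Int) (m : Int) (k : Int) : Decidable (Pre_howManyGoodSubarrays A m k) := by
  unfold Pre_howManyGoodSubarrays; infer_instance

def pvWitness_howManyGoodSubarrays : List Int × Int × Int := ([3, 0, -2, 5], 4, 2)

def Spec_howManyGoodSubarrays (A : List Int) (m : Int) (k : Int) (out : Int) : Prop := out = howManyGoodSubarrays_alt A m k
instance (A : List Int) (m : Int) (k : Int) (out : Int) : Decidable (Spec_howManyGoodSubarrays A m k out) := by unfold Spec_howManyGoodSubarrays; infer_instance

-- ===== CLAIM (what is proved, stated in full; the proofs are below) =====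
def Claim_equal_howManyGoodSubarrays : Prop := ∀ (A : List Int) (m : Int) (k : Int), Dom_howManyGoodSubarrays A m k → Pre_howManyGoodSubarrays A m k → Spec_howManyGoodSubarrays A m k (howManyGoodSubarrays A m k)

-- ===== LEMMAS AND PROOFS =====

-- Python-mod differs from its argument by a multiple of the divisor
theorem pv_mod_sub_dvd (x m : Int) : m ∣ (PySem.Int.mod x m - x) := by
  refine ⟨-(PySem.Int.floordiv x m), ?_⟩
  have h := PySem.Int.floordiv_mul_add_mod x m
  linear_combination h

-- Python-mod only depends on the residue class of its argument
theorem pv_mod_congr (x y m : Int) (h : m ∣ (x - y)) :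
    PySem.Int.mod x m = PySem.Int.mod y m := by
  by_cases hm : m = 0
  · subst hm
    have hxy : x = y := by have := Int.zero_dvd.mp h; omega
    rw [hxy]
  · have hd : m ∣ (PySem.Int.mod x m - PySem.Int.mod y m) := by
      have h1 := pv_mod_sub_dvd x m
      have h2 := pv_mod_sub_dvd y m
      have : PySem.Int.mod x m - PySem.Int.mod y m
          = (PySem.Int.mod x m - x) + (x - y) - (PySem.Int.mod y m - y) := by ring
      rw [this]
      exact dvd_sub (dvd_add h1 h) h2
    by_contra hne
    have hdne : PySem.Int.mod x m - PySem.Int.mod y m ≠ 0 := by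
      intro h0; exact hne (by omega)
    have habs : |m| ≤ |PySem.Int.mod x m - PySem.Int.mod y m| :=
      Int.le_of_dvd (abs_pos.mpr hdne) ((abs_dvd _ _).mpr ((dvd_abs _ _).mpr hd))
    rcases lt_trichotomy m 0 with hlt | heq | hgt
    · have b1 := PySem.Int.mod_neg_bounds x (b := m) hlt
      have b2 := PySem.Int.mod_neg_bounds y (b := m) hlt
      rw [abs_of_neg hlt] at habs
      rcases abs_cases (PySem.Int.mod x m - PySem.Int.mod y m) with ⟨he, _⟩ | ⟨he, _⟩ <;> omega
    · exact hm heq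
    · have b1l := PySem.Int.mod_nonneg x (b := m) hgt
      have b1u := PySem.Int.mod_lt x (b := m) hgt
      have b2l := PySem.Int.mod_nonneg y (b := m) hgt
      have b2u := PySem.Int.mod_lt y (b := m) hgt
      rw [abs_of_pos hgt] at habs
      rcases abs_cases (PySem.Int.mod x m - PySem.Int.mod y m) with ⟨he, _⟩ | ⟨he, _⟩ <;> omega

def pvProd (l : List Int) : Int := l.foldl (· * ·) 1

theorem pvReduceMul_eq_pvProd (x : Int) (xs : List Int) :
    pvReduceMul (x :: xs) = pvProd (x :: xs) := by
  simp only [pvReduceMul, pvProd, List.foldl_cons, one_mul]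

theorem pvProd_append_singleton (l : List Int) (a : Int) :
    pvProd (l ++ [a]) = pvProd l * a := by
  simp [pvProd, List.foldl_append]

theorem pvReduceMul_ne_nil (l : List Int) (h : l ≠ []) : pvReduceMul l = pvProd l := by
  cases l with
  | nil => exact absurd rfl h
  | cons x xs => exact pvReduceMul_eq_pvProd x xs

-- the key inner-loop correspondence: A's fold over prefix lengths (slices pre ++ L.take (t+1))
-- equals the count component of B's stateful fold over L, given the state invariant.
theorem pv_inner_key (m k : Int) (L : List Int) : ∀ (pre : List Int) (c p : Int) (z : Bool),
    z = pre.contains 0 →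
    (z = false → m ∣ (p - pvProd pre)) →
    (List.range L.length).foldl
        (fun c t =>
          if k ≠ 0 ∧ (0 : Int) ∈ pre ++ L.take (t + 1) then c
          else if k = 0 ∧ (0 : Int) ∈ pre ++ L.take (t + 1) then c + 1
          else if PySem.Int.mod (pvReduceMul (pre ++ L.take (t + 1))) m = k then c + 1
          else c) c
      = (L.foldl (pvStepB m k) (c, p, z)).1 := by
  induction L with
  | nil => intro pre c p z _ _; rfl
  | cons a L' ih =>
    intro pre c p z hz hp
    have hr : List.range (a :: L').length = 0 :: (List.range L'.length).map Nat.succ := by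
      simp [List.range_succ_eq_map]
    rw [hr, List.foldl_cons, List.foldl_map, List.foldl_cons]
    by_cases hz' : (z || (a == 0)) = true
    · -- a zero occurs in pre ++ [a]
      have hmem : (0 : Int) ∈ pre ++ [a] := by
        rcases Bool.or_eq_true_iff.mp hz' with h | h
        · rw [hz] at h
          exact List.mem_append_left _ (List.contains_iff_mem.mp h)
        · have : a = 0 := eq_of_beq h
          simp [this]
      have hc0 : (if k ≠ 0 ∧ (0 : Int) ∈ pre ++ (a :: L').take (0 + 1) then c
          else if k = 0 ∧ (0 : Int) ∈ pre ++ (a :: L').take (0 + 1) then c + 1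
          else if PySem.Int.mod (pvReduceMul (pre ++ (a :: L').take (0 + 1))) m = k then c + 1
          else c) = (if k = 0 then c + 1 else c) := by
        by_cases hk : k = 0 <;> simp [hk, hmem]
      have hstep : pvStepB m k (c, p, z) a = (if k = 0 then c + 1 else c, p, true) := by
        simp [pvStepB, hz']
      have key := ih (pre ++ [a]) (if k = 0 then c + 1 else c) p true
        ((List.contains_iff_mem.mpr hmem).symm)
        (by intro h; cases h)
      simp only [List.take_succ_cons, List.take_zero, List.append_assoc, List.singleton_append,
        Nat.succ_eq_add_one] at key hc0 ⊢
      rw [hc0, hstep]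
      exact key
    · -- no zero yet: z = false and a ≠ 0
      have hzf : z = false := by
        cases z
        · rfl
        · exact absurd (by simp) hz'
      have ha : a ≠ 0 := by
        intro h0
        exact hz' (by simp [h0])
      have hnpre : (0 : Int) ∉ pre := by
        intro hmem
        rw [hzf] at hz
        exact absurd (List.contains_iff_mem.mpr hmem) (by rw [← hz]; simp)
      have hnmem : (0 : Int) ∉ pre ++ [a] := by
        intro hmem
        rcases List.mem_append.mp hmem with h | h
        · exact hnpre h
        · exact ha (by simpa [eq_comm] using h)
      have hdvd : m ∣ (p - pvProd pre) := hp hzf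
      have hprodeq : PySem.Int.mod (pvReduceMul (pre ++ [a])) m = PySem.Int.mod (p * a) m := by
        rw [pvReduceMul_ne_nil _ (by simp), pvProd_append_singleton]
        apply pv_mod_congr
        have : pvProd pre * a - p * a = -((p - pvProd pre) * a) := by ring
        rw [this]
        exact dvd_neg.mpr (Dvd.dvd.mul_right hdvd a)
      have hc0 : (if k ≠ 0 ∧ (0 : Int) ∈ pre ++ (a :: L').take (0 + 1) then c
          else if k = 0 ∧ (0 : Int) ∈ pre ++ (a :: L').take (0 + 1) then c + 1
          else if PySem.Int.mod (pvReduceMul (pre ++ (a :: L').take (0 + 1))) m = k then c + 1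
          else c) = (if PySem.Int.mod (p * a) m = k then c + 1 else c) := by
        simp only [List.take_succ_cons, List.take_zero]
        rw [if_neg (by tauto), if_neg (by tauto)]
        simp only [hprodeq]
      have hstep : pvStepB m k (c, p, z) a
          = (if PySem.Int.mod (p * a) m = k then c + 1 else c, PySem.Int.mod (p * a) m, false) := by
        have ha' : (a == 0) = false := by simp [ha]
        simp [pvStepB, hzf, ha']
      have hdvd' : m ∣ (PySem.Int.mod (p * a) m - pvProd (pre ++ [a])) := by
        rw [pvProd_append_singleton]
        have h1 := pv_mod_sub_dvd (p * a) m
        have h2 : m ∣ (p * a - pvProd pre * a) := by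
          have : p * a - pvProd pre * a = (p - pvProd pre) * a := by ring
          rw [this]; exact Dvd.dvd.mul_right hdvd a
        have : PySem.Int.mod (p * a) m - pvProd pre * a
            = (PySem.Int.mod (p * a) m - p * a) + (p * a - pvProd pre * a) := by ring
        rw [this]
        exact dvd_add h1 h2
      have key := ih (pre ++ [a]) (if PySem.Int.mod (p * a) m = k then c + 1 else c)
        (PySem.Int.mod (p * a) m) false
        (by simp [List.contains_eq_mem, hnmem])
        (fun _ => hdvd')
      simp only [List.take_succ_cons, List.take_zero, List.append_assoc, List.singleton_append,
        Nat.succ_eq_add_one] at key hc0 ⊢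
      rw [hc0, hstep]
      exact key

-- for one start index i (0 ≤ i), A's inner loop equals the count of B's inner loop
theorem pv_inner_A_eq_B (A : List Int) (m k c : Int) (i : Int) (h0 : 0 ≤ i) :
    (PySem.List.pyRange i (A.length : Int) 1).foldl (fun count j => pvBodyA A m k count i j) c
    = ((PySem.List.pyRange i (A.length : Int) 1).foldl
        (fun st j => pvStepB m k st (PySem.List.pyGetD A j 0)) (c, 1, false)).1 := by
  obtain ⟨iN, rfl⟩ : ∃ nn : Nat, i = (nn : Int) := ⟨i.toNat, (Int.toNat_of_nonneg h0).symm⟩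
  rw [PySem.List.foldl_pyRange_pyGetD' A 0 (pvStepB m k) (c, 1, false) h0]
  rw [PySem.List.pyRange_one, List.foldl_map]
  have hlen : (((A.length : Int)) - (iN : Int)).toNat = (A.drop iN).length := by
    simp [List.length_drop]
  rw [hlen]
  have hcongr : ∀ (cc : Int) (t : Nat), t ∈ List.range (A.drop iN).length →
      pvBodyA A m k cc (iN : Int) ((iN : Int) + (t : Int))
      = (if k ≠ 0 ∧ (0 : Int) ∈ [] ++ (A.drop iN).take (t + 1) then cc
         else if k = 0 ∧ (0 : Int) ∈ [] ++ (A.drop iN).take (t + 1) then cc + 1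
         else if PySem.Int.mod (pvReduceMul ([] ++ (A.drop iN).take (t + 1))) m = k then cc + 1
         else cc) := by
    intro cc t _
    have hcast : ((iN : Int) + (t : Int) + 1) = ((iN + t + 1 : Nat) : Int) := by push_cast; ring
    have hslice : PySem.List.slice A (some (iN : Int)) (some ((iN : Int) + (t : Int) + 1))
        = (A.drop iN).take (t + 1) := by
      have harith : iN + t + 1 - iN = t + 1 := by omega
      rw [hcast, PySem.List.slice_natCast, harith]
    simp only [pvBodyA, hslice]
    rfl
  simp only [Int.toNat_natCast]
  have key := pv_inner_key m k (A.drop iN) [] c 1 false rfl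
    (by intro _; simp [pvProd])
  rw [← key]
  exact PySem.List.foldl_congr_mem _ _ _ _ hcongr

-- ===== VERDICT (by name: the statement is the Claim_ definition above) =====
theorem howManyGoodSubarrays_spec : Claim_equal_howManyGoodSubarrays := by
  intro A m k _ _
  unfold Spec_howManyGoodSubarrays howManyGoodSubarrays howManyGoodSubarrays_alt
  refine PySem.List.foldl_congr_mem _ _ _ _ ?_
  intro c i hi
  exact pv_inner_A_eq_B A m k c i (PySem.List.mem_pyRange_one.mp hi).1
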